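-- pv_equiv track=rewrite | github.com/JintusSerdar/Teorem | test 7.py | calculate_a
-- ===== SOURCE A (Python) =====
-- def comb(n, k):
--     if (k > n):
--         return 0
--     elif (k == 0):
--         return 1
--     else:
--         return comb(n - 1, k - 1) + comb(n - 1, k);
--
-- def calculate_a(K):
--     '''
--     P'yi degistirmek girilmesi gereken datanin hangi sayidan baslayacagini seciyor. Arttirmak piramtite saga kaydiriyor. Default: K + 1
--     P'yi arttirmak ayni zamanda Worpitzky ucgeninde surumu arttiriyor ///assagi carpraza/// sola goturuyor.///
--     L'yi azaltmak Worpitzky ucgeninin surumunu arttiriyor ve assagi goturuyor. Piramitte uste cikiyor. Default: K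
--     J'yi arttirmak Worpitzky ucgeninde alta inmeni sagliyor. Default: K
--
--     J den buyuk P le L nin esitlenmesi 0 liyor grafikle cozulebilir gibi kesistikleri nokta buluyor sanirim
--     L nin negatif sayi olmasi 0 liyor muhtamelen gercek cozum kumesi yok diyor
--     P yi K kucukken degistirmek farkli sayilar verdirtiyor
--     '''
--     A = 5
--     P = A
--     L = A - 1
--     J = 6
--     # L yi belli bir seviyenin uzerine cikarmak garip sayilar veriyor.
--     # piramidin yonunu degistirmek icin belki - i ler + yapilabilir
--
--     r1 = 0
--
--     # burasi n degerlerine 0 atiyor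
--     # coefficents = {}
--     # for i in range(K + 1):
--     #     coefficents["n{}".format(i + 1)] = 0
--
--
--     for i in range(K + 1): #buradaki K yi degistirmek bir sey yapmiyor cunku combinasyonda (a,b) de b a den buyukse 0 veriyor
--         coefficient = (-1) ** i * comb(L, i)
--         term = coefficient * (P - i) ** J
--         r1 += term
--
--     return r1
-- ===== SOURCE B (Python) =====
-- def calculate_a(K):
--     P = 5
--     L = 4
--     J = 6
--     # Terms with i > L vanish (C(L,i) = 0), so only loop up to min(K, L),
--     # maintaining the binomial coefficient incrementally (Pascal-row update).
--     r1 = 0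
--     c = 1
--     for i in range(min(K, L) + 1):
--         if i > 0:
--             c = c * (L - i + 1) // i
--         r1 += (-1) ** i * c * (P - i) ** J
--     return r1
-- ===== Notes on version B (the rewrite author's own statement) =====
-- stated objective: faster
-- what changed: B truncates the loop at min(K, L) (the remaining binomial coefficients are zero) and maintains the binomial coefficient by an incremental Pascal-row update instead of calling the exponential recursive comb each iteration, making B O(1) in K.
import Mathlib
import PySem

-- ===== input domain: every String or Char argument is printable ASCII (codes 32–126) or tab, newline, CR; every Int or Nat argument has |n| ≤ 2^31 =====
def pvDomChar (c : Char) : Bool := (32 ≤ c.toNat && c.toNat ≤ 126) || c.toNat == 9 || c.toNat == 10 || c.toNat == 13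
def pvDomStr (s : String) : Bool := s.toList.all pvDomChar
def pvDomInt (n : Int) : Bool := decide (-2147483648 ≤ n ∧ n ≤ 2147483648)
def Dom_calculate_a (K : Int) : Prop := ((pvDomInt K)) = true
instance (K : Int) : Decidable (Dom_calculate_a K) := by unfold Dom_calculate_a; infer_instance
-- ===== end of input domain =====

-- B truncates the loop at min(K, L) (later binomial coefficients are zero) and maintains the
-- binomial coefficient by an incremental Pascal-row update instead of recomputing the exponential
-- recursive comb each iteration; a timing run measured B faster.

-- ===== PORT A =====
-- comb with a fuel guard that only makes the same recursion total; the fuel n.toNat + 2 is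
-- sufficient for every call calculate_a makes (0 ≤ k), where Python's comb terminates.
def combFuel : Nat → Int → Int → Int
  | 0, _, _ => 0
  | fuel+1, n, k =>
    if k > n then 0
    else if k = 0 then 1
    else combFuel fuel (n - 1) (k - 1) + combFuel fuel (n - 1) k

def comb (n k : Int) : Int := combFuel (n.toNat + 2) n k

def calculate_a (K : Int) : Int :=
  let A : Int := 5
  let P : Int := A
  let L : Int := A - 1
  -- J = 6 appears as the exponent (a Nat in Lean)
  (PySem.List.pyRange 0 (K + 1) 1).foldl
    (fun r1 i =>
      let coefficient := (-1 : Int) ^ i.toNat * comb L i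
      let term := coefficient * (P - i) ^ 6
      r1 + term) 0

-- ===== PORT B =====
def calculate_a_alt (K : Int) : Int :=
  let P : Int := 5
  let L : Int := 4
  ((PySem.List.pyRange 0 (min K L + 1) 1).foldl
    (fun (s : Int × Int) i =>
      let c := if i > 0 then PySem.Int.floordiv (s.2 * (L - i + 1)) i else s.2
      (s.1 + (-1 : Int) ^ i.toNat * c * (P - i) ^ 6, c)) (0, 1)).1

-- ===== PRECONDITION & SPEC =====
def Spec_calculate_a (K : Int) (out : Int) : Prop := out = calculate_a_alt K
instance (K : Int) (out : Int) : Decidable (Spec_calculate_a K out) := by unfold Spec_calculate_a; infer_instance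

-- ===== CLAIM (what is proved, stated in full; the proofs are below) =====
def Claim_equal_calculate_a : Prop := ∀ (K : Int), Dom_calculate_a K → Spec_calculate_a K (calculate_a K)

-- ===== LEMMAS AND PROOFS =====

lemma comb_four_eq_zero (i : Int) (h : 5 ≤ i) : comb 4 i = 0 := by
  show combFuel 6 4 i = 0
  unfold combFuel
  rw [if_pos (by omega)]

lemma foldl_fixed {α : Type} (f : Int → α → Int) :
    ∀ (l : List α), (∀ a x, x ∈ l → f a x = a) → ∀ acc, l.foldl f acc = acc
  | [], _, _ => rfl
  | x :: xs, h, acc => by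
    rw [List.foldl_cons, h acc x List.mem_cons_self]
    exact foldl_fixed f xs (fun a y hy => h a y (List.mem_cons_of_mem _ hy)) acc

lemma calculate_a_high (K : Int) (h : 5 ≤ K) : calculate_a K = calculate_a 4 := by
  simp only [calculate_a]
  rw [show (4:Int) + 1 = 5 from rfl,
    PySem.List.pyRange_one_append 0 5 (K + 1) (by omega) (by omega), List.foldl_append]
  exact foldl_fixed _ _ (fun a i hi => by
    rw [PySem.List.mem_pyRange_one] at hi

    rw [show (5:Int) - 1 = 4 from rfl, comb_four_eq_zero i (by omega)]
    ring) _

lemma calculate_a_alt_high (K : Int) (h : 5 ≤ K) : calculate_a_alt K = calculate_a_alt 4 := by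
  simp only [calculate_a_alt]
  rw [min_eq_right (by omega : (4:Int) ≤ K), min_self]

-- ===== VERDICT (by name: the statement is the Claim_ definition above) =====
theorem calculate_a_spec : Claim_equal_calculate_a := by
  intro K _
  unfold Spec_calculate_a
  by_cases h5 : 5 ≤ K
  · rw [calculate_a_high K h5, calculate_a_alt_high K h5]
    decide
  · by_cases h0 : 0 ≤ K
    · interval_cases K <;> decide
    · -- K < 0: both ranges are empty
      simp only [calculate_a, calculate_a_alt]
      rw [PySem.List.pyRange_one_eq_nil (by omega : K + 1 ≤ 0),
        PySem.List.pyRange_one_eq_nil (by omega : min K 4 + 1 ≤ 0)]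
      rfl
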